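-- pv_equiv track=rewrite | github.com/larsvasseldonk/pymonosplitter | src/util.py | get_name_combinations
-- ===== SOURCE A (Python) =====
-- def get_name_combinations(name):
-- 	'''
-- 	input: string with points e.g. 'beets.autotag.hooks'
-- 	output: list with combinations e.g. ['hooks', 'autotag.hooks', 'beets.autotag.hooks']
-- 	'''
-- 	names = list()
-- 	for i, elem in enumerate(reversed(name.split('.'))):
-- 		if i == 0:
-- 			name = elem
-- 		else:
-- 			name = elem + '.' + name
-- 		names.append(name)
-- 	return names
-- ===== SOURCE B (Python) =====
-- def get_name_combinations(name):
-- 	parts = name.split('.')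
-- 	return ['.'.join(parts[i:]) for i in range(len(parts) - 1, -1, -1)]
-- ===== Notes on version B (the rewrite author's own statement) =====
-- stated objective: simpler
-- what changed: Replaces the stateful loop that grows an accumulator string step by step with a direct slice-and-join: each suffix is computed independently by dot-joining the tail slice parts[i:] over a descending range.
import Mathlib
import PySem

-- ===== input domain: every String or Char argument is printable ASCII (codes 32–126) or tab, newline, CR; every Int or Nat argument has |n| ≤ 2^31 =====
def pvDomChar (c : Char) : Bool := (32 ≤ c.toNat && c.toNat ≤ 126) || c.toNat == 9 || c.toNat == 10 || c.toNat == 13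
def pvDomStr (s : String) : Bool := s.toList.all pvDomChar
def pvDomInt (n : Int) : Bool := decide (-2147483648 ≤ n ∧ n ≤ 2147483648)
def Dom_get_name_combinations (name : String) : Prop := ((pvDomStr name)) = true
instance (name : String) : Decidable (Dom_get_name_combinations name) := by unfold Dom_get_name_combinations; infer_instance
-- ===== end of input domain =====

-- B replaces A's stateful accumulator loop by computing each suffix independently as a slice-join over a descending range (simpler decomposition, same cost).


-- ===== PORT A =====
-- loop over enumerate(reversed(name.split('.'))) carrying (name, names) as state
def get_name_combinations (name : String) : List String :=
  let parts := (PySem.Str.split? name ".").getD []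
  (((PySem.List.enumerate parts.reverse).foldl
      (fun (st : String × List String) p =>
        let nm := if p.1 == 0 then p.2 else p.2 ++ "." ++ st.1
        (nm, st.2 ++ [nm]))
      (name, [])).2)

-- ===== PORT B =====
-- each suffix built independently: '.'.join(parts[i:]) for i in range(len(parts)-1, -1, -1)
def get_name_combinations_alt (name : String) : List String :=
  let parts := (PySem.Str.split? name ".").getD []
  (PySem.List.pyRange ((parts.length : Int) - 1) (-1) (-1)).map
    (fun i => PySem.Str.join "." (PySem.List.slice parts (some i)))

-- ===== PRECONDITION & SPEC =====
def Spec_get_name_combinations (name : String) (out : List String) : Prop := out = get_name_combinations_alt name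
instance (name : String) (out : List String) : Decidable (Spec_get_name_combinations name out) := by unfold Spec_get_name_combinations; infer_instance

-- ===== CLAIM (what is proved, stated in full; the proofs are below) =====
def Claim_equal_get_name_combinations : Prop := ∀ (name : String), Dom_get_name_combinations name → Spec_get_name_combinations name (get_name_combinations name)

-- ===== LEMMAS AND PROOFS =====

-- '.'-join, abbreviated
def joinS (p : List String) : String := PySem.Str.join "." p

-- the strings A's loop appends after the first iteration, from accumulator acc
def gA : List String → String → List String
  | [], _ => []
  | e :: r, acc => (e ++ "." ++ acc) :: gA r (e ++ "." ++ acc)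

theorem joinS_singleton (e : String) : joinS [e] = e := by
  apply String.ext
  simp [joinS, PySem.Str.toList_join, PySem.Chars.join_singleton]

theorem joinS_cons (f : String) (p : List String) (hp : p ≠ []) :
    joinS (f :: p) = f ++ "." ++ joinS p := by
  obtain ⟨h, t, rfl⟩ := List.exists_cons_of_ne_nil hp
  apply String.ext
  have h1 := PySem.Str.toList_join "." (f :: h :: t)
  have h2 := PySem.Str.toList_join "." (h :: t)
  simp only [joinS, h1, List.map_cons, PySem.Chars.join_cons_cons]
  simp [h2]

theorem foldA (r : List String) (j : Int) (acc : String) (out : List String) (hj : 1 ≤ j) :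
    ((PySem.List.enumerate r j).foldl
      (fun (st : String × List String) (p : Int × String) =>
        (if p.1 == 0 then p.2 else p.2 ++ "." ++ st.1,
         st.2 ++ [if p.1 == 0 then p.2 else p.2 ++ "." ++ st.1]))
      (acc, out)).2 = out ++ gA r acc := by
  induction r generalizing j acc out with
  | nil => simp [PySem.List.enumerate_nil, gA]
  | cons e r ih =>
      have hj0 : (j == 0) = false := by simp; omega
      simp only [PySem.List.enumerate_cons, List.foldl_cons, hj0, Bool.false_eq_true, if_false]
      rw [ih (j + 1) (e ++ "." ++ acc) (out ++ [e ++ "." ++ acc]) (by omega)]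
      simp [gA]

theorem gA_char (r : List String) : ∀ (q : List String), q ≠ [] →
    gA r (joinS q.reverse) = (List.range r.length).map
      (fun k : Nat => joinS ((q ++ r.take (k + 1)).reverse)) := by
  induction r with
  | nil => intro q hq; simp [gA]
  | cons f r ih =>
      intro q hq
      have hrev : q.reverse ≠ [] := by simpa using hq
      have hhead : f ++ "." ++ joinS q.reverse = joinS ((q ++ [f]).reverse) := by
        rw [List.reverse_append, List.reverse_singleton, List.singleton_append,
          joinS_cons f q.reverse hrev]
      simp only [gA, hhead]
      rw [ih (q ++ [f]) (by simp)]
      simp only [List.length_cons, List.range_succ_eq_map, List.map_cons, List.map_map,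
        List.cons.injEq]
      refine ⟨by simp, ?_⟩
      apply List.map_congr_left
      intro k _
      simp [List.take_succ_cons, List.append_assoc, Nat.succ_eq_add_one]

theorem pyRange_down (n : Nat) :
    PySem.List.pyRange ((n : Int) - 1) (-1) (-1) =
      (List.range n).map (fun k : Nat => (n : Int) - 1 - (k : Int)) := by
  unfold PySem.List.pyRange
  cases n with
  | zero => simp
  | succ m =>
      have h1 : ¬ ((-1 : Int) = 0) := by omega
      have h2 : ¬ (0 < (-1 : Int)) := by omega
      simp only [if_neg h1, if_neg h2]
      rw [if_pos (by push_cast; omega)]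
      have hc : ((((m + 1 : Nat) : Int) - 1 - -1 + - -1 - 1) / - -1).toNat = m + 1 := by
        push_cast; omega
      rw [hc]
      apply List.map_congr_left
      intro k _
      ring

-- A's loop equals B's descending slice-join map, for ANY parts list and initial accumulator
theorem main_eq (acc : String) (parts : List String) :
    ((PySem.List.enumerate parts.reverse).foldl
      (fun (st : String × List String) p =>
        let nm := if p.1 == 0 then p.2 else p.2 ++ "." ++ st.1
        (nm, st.2 ++ [nm]))
      (acc, [])).2 =
    (PySem.List.pyRange ((parts.length : Int) - 1) (-1) (-1)).map
      (fun i => joinS (PySem.List.slice parts (some i))) := by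
  rw [pyRange_down, List.map_map]
  have hRHS : (List.range parts.length).map
      ((fun i => joinS (PySem.List.slice parts (some i))) ∘
        (fun k : Nat => (parts.length : Int) - 1 - (k : Int)))
      = (List.range parts.length).map
      (fun k : Nat => joinS ((parts.reverse.take (k + 1)).reverse)) := by
    apply List.map_congr_left
    intro k hk
    rw [List.mem_range] at hk
    have hge : (0 : Int) ≤ (parts.length : Int) - 1 - k := by omega
    simp only [Function.comp_apply]
    rw [PySem.List.slice_from parts hge]
    congr 2
    rw [List.reverse_take]
    simp only [List.reverse_reverse, List.length_reverse]
    congr 1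
    omega
  rw [hRHS]
  rcases hr : parts.reverse with _ | ⟨e, r⟩
  · have : parts = [] := by simpa using congrArg List.reverse hr
    subst this
    simp [PySem.List.enumerate_nil]
  · have hlen : parts.length = r.length + 1 := by
      have := congrArg List.length hr
      simpa using this
    simp only [PySem.List.enumerate_cons, List.foldl_cons]
    have h0 : ((0 : Int) == 0) = true := by decide
    simp only [h0, if_true, List.nil_append]
    have h01 : (0 : Int) + 1 = 1 := by norm_num
    rw [h01, foldA r 1 e [e] (by omega)]
    have hg : gA r e = (List.range r.length).map
        (fun k : Nat => joinS (([e] ++ r.take (k + 1)).reverse)) := by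
      have := gA_char r [e] (by simp)
      simpa [joinS_singleton] using this
    rw [hg, hlen]
    simp only [List.range_succ_eq_map, List.map_cons, List.map_map]
    simp [joinS_singleton]

-- ===== VERDICT (by name: the statement is the Claim_ definition above) =====
theorem get_name_combinations_spec : Claim_equal_get_name_combinations := by
  intro name _
  unfold Spec_get_name_combinations get_name_combinations get_name_combinations_alt
  exact main_eq name _
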